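-- pv_equiv track=rewrite | github.com/Liorst4/pysteamcli | pysteamcli/app_manifest.py | next_scope
-- ===== SOURCE A (Python) =====
-- def next_scope(it):
--     """
--     Advances the iterator until a scope closing mark is found.
--
--     :param it: Character iterator.
--     :returns: The content of the scope.
--     """
--
--     s_counter = 0
--     for i in it:
--         if i == '{':
--             s_counter += 1
--         elif i == '}':
--             if s_counter == 0:
--                 break
--             else:
--                 s_counter -= 1
--         yield i
-- ===== SOURCE B (Python) =====
-- def _inner(it):
--     # Yield everything up to AND INCLUDING the '}' matching an already-open '{'.
--     for i in it:
--         yield i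
--         if i == '{':
--             yield from _inner(it)
--         elif i == '}':
--             return
--
-- def next_scope(it):
--     it = iter(it)
--     for i in it:
--         if i == '}':
--             return
--         yield i
--         if i == '{':
--             yield from _inner(it)
-- ===== Notes on version B (the rewrite author's own statement) =====
-- stated objective: alternative
-- what changed: Replaces the flat depth-counter loop by a recursive generator that delegates to a helper on each '{', tracking nesting with the call stack instead of an integer.
import Mathlib
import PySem

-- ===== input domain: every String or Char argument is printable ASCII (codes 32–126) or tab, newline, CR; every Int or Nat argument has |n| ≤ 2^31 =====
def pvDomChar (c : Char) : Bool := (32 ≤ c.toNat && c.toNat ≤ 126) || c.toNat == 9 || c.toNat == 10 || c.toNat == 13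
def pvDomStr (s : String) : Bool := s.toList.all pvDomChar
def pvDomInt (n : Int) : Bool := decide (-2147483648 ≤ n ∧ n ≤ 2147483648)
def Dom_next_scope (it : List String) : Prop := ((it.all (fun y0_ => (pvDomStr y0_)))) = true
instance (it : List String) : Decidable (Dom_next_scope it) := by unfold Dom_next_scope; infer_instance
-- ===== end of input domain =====

-- B replaces A's flat depth-counter loop by a recursive helper generator; same output, same cost (objective: alternative).

-- ===== PORT A =====
-- A's loop over the iterator with the integer depth counter s_counter.
def nextScopeLoop : List String → Int → List String
  | [], _ => []
  | i :: rest, c =>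
      if i = "{" then i :: nextScopeLoop rest (c + 1)
      else if i = "}" then
        if c = 0 then [] else i :: nextScopeLoop rest (c - 1)
      else i :: nextScopeLoop rest c

def next_scope (it : List String) : List String := nextScopeLoop it 0

-- ===== PORT B =====
-- _inner : yields up to and including the matching '}', returning the yielded chars and the
-- rest of the shared iterator. fuel ≥ length of the list makes the recursion structural.
def innerB : Nat → List String → List String × List String
  | _, [] => ([], [])
  | 0, rest => ([], rest)   -- never reached when fuel ≥ rest.length
  | fuel + 1, i :: rest =>
      if i = "{" then
        let p := innerB fuel rest
        let q := innerB fuel p.2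
        (i :: (p.1 ++ q.1), q.2)
      else if i = "}" then ([i], rest)
      else
        let p := innerB fuel rest
        (i :: p.1, p.2)

def outerB : Nat → List String → List String
  | _, [] => []
  | 0, _ => []
  | fuel + 1, i :: rest =>
      if i = "}" then []
      else if i = "{" then
        let p := innerB fuel rest
        i :: (p.1 ++ outerB fuel p.2)
      else i :: outerB fuel rest

def next_scope_alt (it : List String) : List String := outerB it.length it

-- ===== PRECONDITION & SPEC =====
def Spec_next_scope (it : List String) (out : List String) : Prop := out = next_scope_alt it
instance (it : List String) (out : List String) : Decidable (Spec_next_scope it out) := by unfold Spec_next_scope; infer_instance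

-- ===== CLAIM (what is proved, stated in full; the proofs are below) =====
def Claim_equal_next_scope : Prop := ∀ (it : List String), Dom_next_scope it → Spec_next_scope it (next_scope it)

-- ===== LEMMAS AND PROOFS =====

theorem innerB_len (fuel : Nat) : ∀ (l : List String), (innerB fuel l).2.length ≤ l.length := by
  induction fuel with
  | zero => intro l; cases l <;> simp [innerB]
  | succ f ih =>
      intro l
      cases l with
      | nil => simp [innerB]
      | cons i rest =>
          simp only [innerB]
          split_ifs <;> simp
          · exact le_trans (le_trans (ih _) (ih rest)) (Nat.le_succ _)
          · exact le_trans (ih rest) (Nat.le_succ _)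

theorem innerB_spec (fuel : Nat) : ∀ (l : List String) (c : Int), l.length ≤ fuel → 0 ≤ c →
    nextScopeLoop l (c + 1) = (innerB fuel l).1 ++ nextScopeLoop (innerB fuel l).2 c := by
  induction fuel with
  | zero =>
      intro l c hl _
      cases l with
      | nil => simp [innerB, nextScopeLoop]
      | cons i rest => simp at hl
  | succ f ih =>
      intro l c hl hc
      cases l with
      | nil => simp [innerB, nextScopeLoop]
      | cons i rest =>
          simp only [List.length_cons, Nat.succ_le_succ_iff] at hl
          by_cases h1 : i = "{"
          · subst h1
            have h2 := innerB_len f rest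
            have e1 := ih rest (c + 1) hl (by omega)
            have e2 := ih (innerB f rest).2 c (le_trans h2 hl) hc
            simp only [innerB, nextScopeLoop, if_pos rfl, if_true, List.cons_append, List.append_assoc]
            rw [show c + 1 + 1 = (c + 1) + 1 by ring, e1, e2]
          · by_cases h2 : i = "}"
            · subst h2
              simp only [innerB, nextScopeLoop, if_neg (by decide : ¬("}":String) = "{"), if_pos rfl,
                if_neg (show ¬ c + 1 = 0 by omega), if_true, List.cons_append, List.nil_append]
              rw [show c + 1 - 1 = c by ring]
            · simp only [innerB, nextScopeLoop, if_neg h1, if_neg h2, List.cons_append]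
              rw [ih rest c hl hc]

theorem outerB_spec (fuel : Nat) : ∀ (l : List String), l.length ≤ fuel →
    nextScopeLoop l 0 = outerB fuel l := by
  induction fuel with
  | zero =>
      intro l hl
      cases l with
      | nil => simp [outerB, nextScopeLoop]
      | cons i rest => simp at hl
  | succ f ih =>
      intro l hl
      cases l with
      | nil => simp [outerB, nextScopeLoop]
      | cons i rest =>
          simp only [List.length_cons, Nat.succ_le_succ_iff] at hl
          by_cases h1 : i = "{"
          · subst h1
            have e1 := innerB_spec f rest 0 hl le_rfl
            rw [show (0:Int) + 1 = 1 by ring] at e1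
            simp only [outerB, nextScopeLoop, if_pos rfl, if_true, if_neg (by decide : ¬("{":String) = "}")]
            rw [show (0:Int) + 1 = 1 by ring, e1,
              ih (innerB f rest).2 (le_trans (innerB_len f rest) hl)]
          · by_cases h2 : i = "}"
            · subst h2
              simp [outerB, nextScopeLoop]
            · simp only [outerB, nextScopeLoop, if_neg h1, if_neg h2]
              rw [ih rest hl]

-- ===== VERDICT (by name: the statement is the Claim_ definition above) =====
theorem next_scope_spec : Claim_equal_next_scope := by
  intro it _
  unfold Spec_next_scope next_scope next_scope_alt
  exact outerB_spec it.length it le_rfl
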